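-- pv_equiv track=rewrite | github.com/lilmoon99/introducingToPython | Seminars/Урок 4. Словари, множества и профилирование/hw_task2.py | collect_berries
-- ===== SOURCE A (Python) =====
-- def collect_berries(bushes_list:list) -> list:
--     temp_collected_berries = []
--     max_berries_count = 0
--     for i in range(len(bushes_list)):
--         if max_berries_count < bushes_list[i - 1] + bushes_list[i] + bushes_list[i - len(bushes_list) + 1]:
--             max_berries_count = bushes_list[i - 1] + bushes_list[i] + bushes_list[i - len(bushes_list) + 1]
--         temp_collected_berries.append(bushes_list[i - 1] + bushes_list[i] + bushes_list[i - len(bushes_list) + 1])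
--     return temp_collected_berries
-- ===== SOURCE B (Python) =====
-- def collect_berries(bushes_list: list) -> list:
--     prev = bushes_list[-1:] + bushes_list[:-1]
--     nxt = bushes_list[1:] + bushes_list[:1]
--     return [a + b + c for a, b, c in zip(prev, bushes_list, nxt)]
-- ===== Notes on version B (the rewrite author's own statement) =====
-- stated objective: simpler
-- what changed: Replaces the index loop with wrap-around index arithmetic (and its unused running maximum) by an element-wise zip-sum of the list with its two circular rotations built by slicing.
import Mathlib
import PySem

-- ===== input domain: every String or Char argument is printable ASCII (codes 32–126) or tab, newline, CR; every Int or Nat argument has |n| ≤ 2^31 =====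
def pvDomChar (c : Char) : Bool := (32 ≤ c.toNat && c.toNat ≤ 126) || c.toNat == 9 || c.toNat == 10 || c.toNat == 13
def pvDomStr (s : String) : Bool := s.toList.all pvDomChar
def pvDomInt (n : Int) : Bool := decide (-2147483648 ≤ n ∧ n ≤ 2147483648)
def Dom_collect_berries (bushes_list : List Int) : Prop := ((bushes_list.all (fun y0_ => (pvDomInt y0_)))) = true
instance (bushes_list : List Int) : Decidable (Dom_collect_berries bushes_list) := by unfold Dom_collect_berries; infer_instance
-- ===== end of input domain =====

-- B replaces A's wrap-around index arithmetic (and its unused running maximum) by an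
-- element-wise sum of the list with its two circular rotations (objective: simpler).

-- ===== PORT A =====
-- index loop over range(len(xs)); indices i-1, i, i-len+1 are always in range in Python,
-- so the total pyGetD (default 0, never used) is exact here
def collect_berries (bushes_list : List Int) : List Int :=
  ((PySem.List.pyRange 0 (bushes_list.length : Int) 1).foldl
    (fun (st : List Int × Int) i =>
      let s := PySem.List.pyGetD bushes_list (i - 1) 0 + PySem.List.pyGetD bushes_list i 0 +
               PySem.List.pyGetD bushes_list (i - (bushes_list.length : Int) + 1) 0
      (st.1 ++ [s], if st.2 < s then s else st.2))
    ([], 0)).1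

-- ===== PORT B =====
def collect_berries_alt (bushes_list : List Int) : List Int :=
  let prev := PySem.List.slice bushes_list (some (-1)) none ++ PySem.List.slice bushes_list none (some (-1))
  let nxt  := PySem.List.slice bushes_list (some 1) none ++ PySem.List.slice bushes_list none (some 1)
  (prev.zip (bushes_list.zip nxt)).map (fun t => t.1 + t.2.1 + t.2.2)

-- ===== PRECONDITION & SPEC =====
def Spec_collect_berries (bushes_list : List Int) (out : List Int) : Prop := out = collect_berries_alt bushes_list
instance (bushes_list : List Int) (out : List Int) : Decidable (Spec_collect_berries bushes_list out) := by unfold Spec_collect_berries; infer_instance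

-- ===== CLAIM (what is proved, stated in full; the proofs are below) =====
def Claim_equal_collect_berries : Prop := ∀ (bushes_list : List Int), Dom_collect_berries bushes_list → Spec_collect_berries bushes_list (collect_berries bushes_list)

-- ===== LEMMAS AND PROOFS =====

-- the neighbour sum A computes at loop index i
def pvSum (xs : List Int) (i : Int) : Int :=
  PySem.List.pyGetD xs (i - 1) 0 + PySem.List.pyGetD xs i 0 +
  PySem.List.pyGetD xs (i - (xs.length : Int) + 1) 0

theorem pvFoldFst (xs : List Int) (l : List Int) (acc : List Int) (m : Int) :
    (l.foldl
      (fun (st : List Int × Int) i =>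
        let s := PySem.List.pyGetD xs (i - 1) 0 + PySem.List.pyGetD xs i 0 +
                 PySem.List.pyGetD xs (i - (xs.length : Int) + 1) 0
        (st.1 ++ [s], if st.2 < s then s else st.2))
      (acc, m)).1 = acc ++ l.map (pvSum xs) := by
  induction l generalizing acc m with
  | nil => simp
  | cons a t ih => simp [ih, pvSum]

theorem pvA_eq_map (xs : List Int) :
    collect_berries xs = (PySem.List.pyRange 0 (xs.length : Int) 1).map (pvSum xs) := by
  simpa [collect_berries] using pvFoldFst xs (PySem.List.pyRange 0 (xs.length : Int) 1) [] 0

theorem collect_berries_spec' (xs : List Int) :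
    collect_berries xs = collect_berries_alt xs := by
  rw [pvA_eq_map]
  simp only [collect_berries_alt, PySem.List.slice_from_neg_one, PySem.List.slice_to_neg_one,
    PySem.List.slice_from_one]
  rw [show PySem.List.slice xs none (some 1) = xs.take 1 from by simp [pysem]]
  apply List.ext_getElem
  · simp [PySem.List.length_pyRange_one]
    omega
  · intro k hk hk'
    have hn : k < xs.length := by
      simpa [PySem.List.length_pyRange_one] using hk
    simp only [List.getElem_map, PySem.List.getElem_pyRange_one, List.getElem_zip, pvSum]
    rw [show (0 : Int) + (k : Int) = (k : Int) by ring]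
    -- left neighbour
    have hprev : PySem.List.pyGetD xs ((k : Int) - 1) 0 =
        (xs.drop (xs.length - 1) ++ xs.dropLast)[k]'(by simp; omega) := by
      rcases Nat.eq_zero_or_pos k with hk0 | hk0
      · subst hk0
        rw [List.getElem_append_left (by simp; omega), List.getElem_drop,
          show ((0:Nat):Int) - 1 = -((1:Nat):Int) by norm_num,
          PySem.List.pyGetD_neg_natCast xs 1 0 (by omega) (by omega)]
        congr 1
      · rw [List.getElem_append_right (by simp; omega), List.getElem_dropLast,
          show (k : Int) - 1 = ((k - 1 : Nat) : Int) by omega, PySem.List.pyGetD_natCast,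
          List.getD_eq_getElem?_getD, List.getElem?_eq_getElem (by omega : k - 1 < xs.length)]
        simp only [Option.getD_some]
        congr 1
        simp
        omega
    -- right neighbour
    have hnxt : PySem.List.pyGetD xs ((k : Int) - (xs.length : Int) + 1) 0 =
        (xs.tail ++ xs.take 1)[k]'(by simp; omega) := by
      rcases Nat.lt_or_ge k (xs.length - 1) with hkl | hkl
      · rw [List.getElem_append_left (by simp; omega), List.getElem_tail,
          show (k : Int) - (xs.length : Int) + 1 = -(((xs.length - 1 - k : Nat)) : Int) by omega,
          PySem.List.pyGetD_neg_natCast xs (xs.length - 1 - k) 0 (by omega) (by omega)]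
        congr 1
        omega
      · rw [List.getElem_append_right (by simp; omega), List.getElem_take,
          show (k : Int) - (xs.length : Int) + 1 = ((0 : Nat) : Int) by omega,
          PySem.List.pyGetD_natCast, List.getD_eq_getElem?_getD,
          List.getElem?_eq_getElem (by omega : 0 < xs.length)]
        simp only [Option.getD_some]
        congr 1
        simp
        omega
    have hmid : PySem.List.pyGetD xs (k : Int) 0 = xs[k]'hn := by
      rw [PySem.List.pyGetD_natCast, List.getD_eq_getElem?_getD, List.getElem?_eq_getElem hn]
      simp
    rw [hprev, hnxt, hmid]

-- ===== VERDICT (by name: the statement is the Claim_ definition above) =====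
theorem collect_berries_spec : Claim_equal_collect_berries := by
  intro xs _
  exact collect_berries_spec' xs
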